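-- pv_equiv track=rewrite | github.com/HEPHZIBAI/unstop | Counting Words.py | find_longest_sentence_length
-- ===== SOURCE A (Python) =====
-- def find_longest_sentence_length(s):
--     s=s.split('.')
--     l=0
--     for i in s:
--         i=i.split(',')
--         for j in i:
--             j=j.split()
--             if len(j)>l:
--                 l=len(j)
--     return l
-- ===== SOURCE B (Python) =====
-- def find_longest_sentence_length(s):
--     best = 0
--     cur = 0
--     in_word = False
--     for c in s:
--         if c == '.' or c == ',':
--             if cur > best:
--                 best = cur
--             cur = 0
--             in_word = False
--         elif c.isspace():
--             in_word = False
--         else: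
--             if not in_word:
--                 in_word = True
--                 cur += 1
--     if cur > best:
--         best = cur
--     return best
-- ===== Notes on version B (the rewrite author's own statement) =====
-- stated objective: alternative
-- what changed: Replaced the nested period-split/comma-split/whitespace-split passes that build intermediate lists with a single left-to-right character scan maintaining (best, current-segment word count, in_word).
import Mathlib
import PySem

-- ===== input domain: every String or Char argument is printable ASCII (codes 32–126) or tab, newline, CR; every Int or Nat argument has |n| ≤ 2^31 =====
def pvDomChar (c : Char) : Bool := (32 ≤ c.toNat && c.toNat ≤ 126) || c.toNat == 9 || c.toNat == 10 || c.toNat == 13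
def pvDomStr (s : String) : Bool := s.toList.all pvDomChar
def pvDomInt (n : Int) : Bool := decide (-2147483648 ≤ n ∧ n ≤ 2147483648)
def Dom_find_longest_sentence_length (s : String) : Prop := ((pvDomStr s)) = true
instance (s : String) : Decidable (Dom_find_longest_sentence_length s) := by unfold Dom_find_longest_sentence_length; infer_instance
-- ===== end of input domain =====

-- B replaces A's nested period/comma/whitespace split passes by one single-pass character scan (alternative decomposition, same return values).

-- ===== PORT A =====
-- String pieces are kept as List Char throughout (length-preserving, exact):
-- PySem.Chars.splitOn/split₀ are Python's split('.')/split(',')/split() on code points.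
def find_longest_sentence_length (s : String) : Int :=
  (PySem.Chars.splitOn s.toList ['.']).foldl (fun l i =>
    (PySem.Chars.splitOn i [',']).foldl (fun l j =>
      let words := PySem.Chars.split₀ j
      if (words.length : Int) > l then (words.length : Int) else l) l) 0

-- ===== PORT B =====
-- state = (best, words in current segment, in_word)
def find_longest_sentence_length_alt (s : String) : Int :=
  let st := s.toList.foldl (fun (acc : Int × Int × Bool) c =>
    if c == '.' || c == ',' then (max acc.1 acc.2.1, 0, false)
    else if PySem.Chars.isspace c then (acc.1, acc.2.1, false)
    else if acc.2.2 then (acc.1, acc.2.1, true)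
    else (acc.1, acc.2.1 + 1, true)) (0, 0, false)
  max st.1 st.2.1

-- ===== PRECONDITION & SPEC =====
def Spec_find_longest_sentence_length (s : String) (out : Int) : Prop := out = find_longest_sentence_length_alt s
instance (s : String) (out : Int) : Decidable (Spec_find_longest_sentence_length s out) := by unfold Spec_find_longest_sentence_length; infer_instance

-- ===== CLAIM (what is proved, stated in full; the proofs are below) =====
def Claim_equal_find_longest_sentence_length : Prop := ∀ (s : String), Dom_find_longest_sentence_length s → Spec_find_longest_sentence_length s (find_longest_sentence_length s)

-- ===== LEMMAS AND PROOFS =====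

def pvSegs (p : Char → Bool) : List Char → List (List Char)
  | [] => [[]]
  | c :: r => if p c then [] :: pvSegs p r
              else match pvSegs p r with
                   | sg :: ss => (c :: sg) :: ss
                   | [] => [[c]]

def pvConsHead (pre : List Char) : List (List Char) → List (List Char)
  | h :: t => (pre ++ h) :: t
  | [] => [pre]

lemma pvSegs_ne_nil (p : Char → Bool) (l : List Char) : pvSegs p l ≠ [] := by
  cases l with
  | nil => simp [pvSegs]
  | cons c r =>
    simp only [pvSegs]
    split
    · simp
    · cases h : pvSegs p r <;> simp

lemma splitOn_go_eq (d : Char) (l : List Char) : ∀ (fuel : Nat) (cur : List Char) (acc : List (List Char)),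
    l.length < fuel →
    PySem.Chars.splitOn.go [d] fuel l cur acc = acc.reverse ++ pvConsHead cur.reverse (pvSegs (fun c => c == d) l) := by
  induction l with
  | nil =>
    intro fuel cur acc h
    cases fuel with
    | zero => omega
    | succ f => simp [PySem.Chars.splitOn.go, pvSegs, pvConsHead]
  | cons c r ih =>
    intro fuel cur acc h
    cases fuel with
    | zero => omega
    | succ f =>
      by_cases hc : c = d
      · subst hc
        simp only [PySem.Chars.splitOn.go, List.isPrefixOf, beq_self_eq_true, Bool.true_and,
          List.isPrefixOf_nil_left, if_true]
        have hd : List.drop [c].length (c :: r) = r := by simp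
        rw [hd, ih f [] (cur.reverse :: acc) (by simpa using Nat.lt_of_succ_lt_succ h)]
        simp only [pvSegs, beq_self_eq_true, if_true]
        cases hs : pvSegs (fun c_1 => c_1 == c) r with
        | nil => exact absurd hs (pvSegs_ne_nil _ _)
        | cons a b => simp [pvConsHead]
      · have hpre : [d].isPrefixOf (c :: r) = false := by
          simp [List.isPrefixOf]
          exact fun hh => hc hh.symm
        simp only [PySem.Chars.splitOn.go, hpre, if_neg, Bool.false_eq_true, not_false_eq_true]
        rw [ih f (c :: cur) acc (by simpa using Nat.lt_of_succ_lt_succ h)]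
        simp only [pvSegs, List.reverse_cons]
        rw [if_neg (by simp [hc])]
        cases hs : pvSegs (fun c => c == d) r with
        | nil => exact absurd hs (pvSegs_ne_nil _ _)
        | cons a b => simp [pvConsHead]

lemma splitOn_eq_pvSegs (d : Char) (l : List Char) :
    PySem.Chars.splitOn l [d] = pvSegs (fun c => c == d) l := by
  rw [PySem.Chars.splitOn, splitOn_go_eq d l (l.length + 1) [] [] (by omega)]
  cases hs : pvSegs (fun c => c == d) l with
  | nil => exact absurd hs (pvSegs_ne_nil _ _)
  | cons a b => simp [pvConsHead]

def pvWc : List Char → Bool → Nat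
  | [], _ => 0
  | c :: r, iw =>
      if PySem.Chars.isspace c then pvWc r false
      else if iw then pvWc r true else 1 + pvWc r true

lemma split₀_go_len (l : List Char) : ∀ (cur : List Char) (acc : List (List Char)),
    (PySem.Chars.split₀.go l cur acc).length =
      acc.length + (if cur.isEmpty then 0 else 1) + pvWc l (!cur.isEmpty) := by
  induction l with
  | nil => intro cur acc; cases cur <;> simp [PySem.Chars.split₀.go, pvWc]
  | cons c r ih =>
    intro cur acc
    by_cases hs : PySem.Chars.isspace c = true
    · cases cur with
      | nil => simp [PySem.Chars.split₀.go, hs, pvWc, ih]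
      | cons x xs => simp [PySem.Chars.split₀.go, hs, pvWc, ih]
    · cases cur with
      | nil => simp [PySem.Chars.split₀.go, hs, pvWc, ih]; omega
      | cons x xs => simp [PySem.Chars.split₀.go, hs, pvWc, ih]

lemma split₀_len (l : List Char) : (PySem.Chars.split₀ l).length = pvWc l false := by
  rw [PySem.Chars.split₀, split₀_go_len]; simp

def pvP2 (c : Char) : Bool := c == '.' || c == ','

lemma pvSegs_flatten (l : List Char) :
    ((pvSegs (fun c => c == '.') l).map (fun x => pvSegs (fun c => c == ',') x)).flatten
      = pvSegs pvP2 l := by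
  induction l with
  | nil => simp [pvSegs]
  | cons c r ih =>
    by_cases h1 : c = '.'
    · subst h1
      simp [pvSegs, pvP2, ← ih]
    · by_cases h2 : c = ','
      · subst h2
        simp only [pvSegs, pvP2]
        rw [if_neg (by simp [h1])]
        cases hs : pvSegs (fun c => c == '.') r with
        | nil => exact absurd hs (pvSegs_ne_nil _ _)
        | cons a b =>
          simp only [List.map_cons, List.flatten_cons, pvSegs, beq_self_eq_true, if_true,
            Bool.or_true, List.cons_append]
          rw [← ih, hs]
          simp
      · simp only [pvSegs, pvP2]
        rw [if_neg (by simp [h1]), if_neg (by simp [h1, h2])]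
        cases hs : pvSegs (fun c => c == '.') r with
        | nil => exact absurd hs (pvSegs_ne_nil _ _)
        | cons a b =>
          simp only [List.map_cons, List.flatten_cons, pvSegs]
          rw [if_neg (by simp [h2])]
          rw [← ih, hs]
          cases ht : pvSegs (fun c => c == ',') a with
          | nil => exact absurd ht (pvSegs_ne_nil _ _)
          | cons u v => simp [ht]

def pvM (xs : List (List Char)) : Int := List.foldr (fun j m => max ((pvWc j false : Int)) m) 0 xs

lemma foldl_upd_eq_max (xs : List (List Char)) : ∀ (init : Int), 0 ≤ init →
    List.foldl (fun l j => if ((pvWc j false : Int)) > l then ((pvWc j false : Int)) else l) init xs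
      = max init (pvM xs) := by
  induction xs with
  | nil => intro init h; simp [pvM]; omega
  | cons j t ih =>
    intro init h
    simp only [List.foldl_cons, pvM, List.foldr_cons]
    have hupd : (if ((pvWc j false : Int)) > init then ((pvWc j false : Int)) else init)
        = max init (pvWc j false : Int) := by
      by_cases hc : ((pvWc j false : Int)) ≤ init
      · rw [if_neg (by omega), max_eq_left hc]
      · rw [if_pos (by omega), max_eq_right (by omega)]
    rw [hupd, ih _ (by positivity), ← max_assoc]
    rfl

def pvStep (acc : Int × Int × Bool) (c : Char) : Int × Int × Bool :=
  if c == '.' || c == ',' then (max acc.1 acc.2.1, 0, false)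
  else if PySem.Chars.isspace c then (acc.1, acc.2.1, false)
  else if acc.2.2 then (acc.1, acc.2.1, true)
  else (acc.1, acc.2.1 + 1, true)

lemma scan_eq (l : List Char) : ∀ (best cur : Int) (iw : Bool) (s0 : List Char) (ss : List (List Char)),
    0 ≤ best → pvSegs pvP2 l = s0 :: ss →
    max (List.foldl pvStep (best, cur, iw) l).1 (List.foldl pvStep (best, cur, iw) l).2.1
      = max (max best (cur + (pvWc s0 iw : Int))) (pvM ss) := by
  induction l with
  | nil =>
    intro best cur iw s0 ss hb hs
    simp only [pvSegs] at hs
    obtain ⟨h0, h1⟩ : s0 = ([] : List Char) ∧ ss = [] := by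
      constructor <;> [exact (List.cons_eq_cons.mp hs.symm).1; exact (List.cons_eq_cons.mp hs.symm).2]
    subst h0; subst h1
    simp [pvWc, pvM]
    omega
  | cons c r ih =>
    intro best cur iw s0 ss hb hs
    by_cases hp : pvP2 c = true
    · simp only [pvSegs, hp, if_true] at hs
      obtain ⟨h0, h1⟩ := List.cons_eq_cons.mp hs.symm
      cases hr : pvSegs pvP2 r with
      | nil => exact absurd hr (pvSegs_ne_nil _ _)
      | cons a b =>
        have hstep : pvStep (best, cur, iw) c = (max best cur, 0, false) := by
          simp only [pvStep, pvP2] at hp ⊢; rw [if_pos hp]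
        simp only [List.foldl_cons, hstep]
        rw [ih (max best cur) 0 false a b (le_trans hb (le_max_left _ _)) hr]
        subst h0; subst h1
        rw [hr]
        simp only [pvWc, pvM, List.foldr_cons]
        rw [zero_add]
        rw [max_assoc]
        simp [pvWc]
    · have hnp : (c == '.' || c == ',') = false := by simpa [pvP2] using hp
      have hpf : pvP2 c = false := by simpa using hp
      simp only [pvSegs, hpf, Bool.false_eq_true, if_false] at hs
      cases hr : pvSegs pvP2 r with
      | nil => exact absurd hr (pvSegs_ne_nil _ _)
      | cons a b =>
        rw [hr] at hs
        obtain ⟨h0, h1⟩ := List.cons_eq_cons.mp hs.symm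
        by_cases hsp : PySem.Chars.isspace c = true
        · have hstep : pvStep (best, cur, iw) c = (best, cur, false) := by
            simp [pvStep, hnp, hsp]
          simp only [List.foldl_cons, hstep]
          rw [ih best cur false a b hb hr]
          subst h0; subst h1
          simp [pvWc, hsp]
        · cases iw with
          | true =>
            have hstep : pvStep (best, cur, true) c = (best, cur, true) := by
              simp [pvStep, hnp, hsp]
            simp only [List.foldl_cons, hstep]
            rw [ih best cur true a b hb hr]
            subst h0; subst h1
            simp [pvWc, hsp]
          | false =>
            have hstep : pvStep (best, cur, false) c = (best, cur + 1, true) := by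
              simp [pvStep, hnp, hsp]
            simp only [List.foldl_cons, hstep]
            rw [ih best (cur + 1) true a b hb hr]
            subst h0; subst h1
            simp only [pvWc, hsp, Bool.false_eq_true, if_false]
            have e : cur + ((1 + pvWc a true : Nat) : Int) = cur + 1 + (pvWc a true : Int) := by
              push_cast; ring
            rw [e]

-- A equals B on every input (no Dom/Pre needed by the argument itself)
theorem pv_main_eq (s : String) : find_longest_sentence_length s = find_longest_sentence_length_alt s := by
  have hB : find_longest_sentence_length_alt s
      = max (List.foldl pvStep (0, 0, false) s.toList).1 (List.foldl pvStep (0, 0, false) s.toList).2.1 := rfl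
  have hA : find_longest_sentence_length s
      = ((pvSegs (fun c => c == '.') s.toList).map (fun x => pvSegs (fun c => c == ',') x)).flatten.foldl
          (fun l j => if ((pvWc j false : Int)) > l then ((pvWc j false : Int)) else l) 0 := by
    rw [List.foldl_flatten, List.foldl_map]
    simp only [find_longest_sentence_length, splitOn_eq_pvSegs, split₀_len]
  rw [hA, hB, pvSegs_flatten, foldl_upd_eq_max _ _ le_rfl]
  cases hr : pvSegs pvP2 s.toList with
  | nil => exact absurd hr (pvSegs_ne_nil _ _)
  | cons a b =>
    rw [scan_eq s.toList 0 0 false a b le_rfl hr]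
    simp only [pvM, List.foldr_cons, zero_add]
    rw [← max_assoc]

-- ===== VERDICT (by name: the statement is the Claim_ definition above) =====
theorem find_longest_sentence_length_spec : Claim_equal_find_longest_sentence_length := by
  intro s _
  unfold Spec_find_longest_sentence_length
  exact pv_main_eq s
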